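-- pv_equiv track=rewrite | github.com/pivoshenko/dotfiles | scripts/switcher.py | _remove_gui_sections
-- ===== SOURCE A (Python) =====
-- def _remove_gui_sections(config: str) -> str:
--     lines = config.splitlines(keepends=True)
--     result = ""
--     skip_lines = False
--     in_gui = False
--
--     for line in lines:
--         stripped = line.strip()
--
--         match stripped == "gui:":
--             case True:
--                 in_gui = True
--                 result += line
--                 continue
--
--         match in_gui:
--             case True:
--                 match stripped.startswith(("theme:", "authorColors:")):
--                     case True:
--                         skip_lines = True
--                         continue
--                 is_top_level = line and not line[0].isspace()
--                 match is_top_level and not stripped.startswith("#"):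
--                     case True:
--                         in_gui = False
--                         skip_lines = False
--                 match skip_lines and line and not line[0].isspace():
--                     case True:
--                         skip_lines = False
--
--         match not skip_lines:
--             case True:
--                 result += line
--
--     return result
-- ===== SOURCE B (Python) =====
-- def _remove_gui_sections(config: str) -> str:
--     lines = config.splitlines(keepends=True)
--     out = []
--     in_gui = False
--     i = 0
--     n = len(lines)
--     while i < n:
--         line = lines[i]
--         stripped = line.strip()
--         if stripped == "gui:":
--             in_gui = True
--             out.append(line)
--             i += 1
--             continue
--         if in_gui and stripped.startswith(("theme:", "authorColors:")):
--             # consume the whole sub-block that follows the header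
--             i += 1
--             while i < n:
--                 s = lines[i].strip()
--                 if s == "gui:":
--                     out.append(lines[i])  # a gui: header is always kept
--                 elif not lines[i][0].isspace():
--                     break  # a non-indented line ends the block
--                 i += 1
--             continue
--         if in_gui and not line[0].isspace() and not stripped.startswith("#"):
--             in_gui = False
--         out.append(line)
--         i += 1
--     return "".join(out)
-- ===== Notes on version B (the rewrite author's own statement) =====
-- stated objective: simpler
-- what changed: Replaces A's skip_lines flag threaded through match-statements with an index-based loop that, on seeing a theme:/authorColors: header inside gui:, consumes the whole following indented sub-block in one inner while-loop (keeping nested gui: headers), so no skip state survives across iterations.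
import Mathlib
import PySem

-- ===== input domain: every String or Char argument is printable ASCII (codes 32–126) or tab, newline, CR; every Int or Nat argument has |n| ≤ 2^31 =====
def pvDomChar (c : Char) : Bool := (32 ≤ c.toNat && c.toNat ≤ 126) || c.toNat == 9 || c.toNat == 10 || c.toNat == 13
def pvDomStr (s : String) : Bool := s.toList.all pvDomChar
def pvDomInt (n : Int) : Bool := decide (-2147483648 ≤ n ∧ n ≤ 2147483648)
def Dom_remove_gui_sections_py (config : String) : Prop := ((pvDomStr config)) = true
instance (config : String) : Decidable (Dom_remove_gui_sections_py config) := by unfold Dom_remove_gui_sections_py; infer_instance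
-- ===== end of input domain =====

-- B replaces A's skip_lines flag with an inner loop that consumes a whole theme:/authorColors: sub-block at once (simpler decomposition, same cost).

-- str.splitlines(keepends=True), ported by hand (PySem.Str.splitlines drops the line ends).
-- Exact on the stated ASCII domain: there the only line breaks are '\n', '\r' and '\r\n'.
def pvSplitKeepGo (acc : List Char) : List Char → List (List Char)
  | [] => if acc = [] then [] else [acc.reverse]
  | '\r' :: '\n' :: rest => (acc.reverse ++ ['\r', '\n']) :: pvSplitKeepGo [] rest
  | c :: rest =>
    if c = '\n' then (acc.reverse ++ ['\n']) :: pvSplitKeepGo [] rest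
    else if c = '\r' then (acc.reverse ++ ['\r']) :: pvSplitKeepGo [] rest
    else pvSplitKeepGo (c :: acc) rest

def pvSplitKeep (s : List Char) : List (List Char) := pvSplitKeepGo [] s

-- 'line and not line[0].isspace()' (is_top_level / the inner-loop break test in B)
def pvTopLevel (l : List Char) : Bool :=
  match l with
  | [] => false
  | c :: _ => !(PySem.Chars.isspace c)

-- ===== PORT A =====
-- one iteration of A's for-loop, state = (result, skip_lines, in_gui)
def pvStepA (st : List Char × Bool × Bool) (line : List Char) : List Char × Bool × Bool :=
  let stripped := PySem.Chars.strip line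
  if stripped = "gui:".toList then (st.1 ++ line, st.2.1, true)
  else if st.2.2 then
    -- the in_gui block
    if PySem.Chars.startswith stripped "theme:".toList ||
       PySem.Chars.startswith stripped "authorColors:".toList then (st.1, true, true)
    else
      let isTop := pvTopLevel line
      let gui' := if isTop && !(PySem.Chars.startswith stripped "#".toList) then false else st.2.2
      let skip' := if isTop && !(PySem.Chars.startswith stripped "#".toList) then false else st.2.1
      let skip'' := if skip' && isTop then false else skip'
      if skip'' then (st.1, skip'', gui') else (st.1 ++ line, skip'', gui')
  else if st.2.1 then (st.1, st.2.1, st.2.2) else (st.1 ++ line, st.2.1, st.2.2)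

def remove_gui_sections_py (config : String) : String :=
  String.ofList ((pvSplitKeep config.toList).foldl pvStepA ([], false, false)).1

-- ===== PORT B =====
-- B's inner while-loop: returns (the kept "gui:" lines, the remaining lines after the block)
def pvConsume : List (List Char) → List (List Char) × List (List Char)
  | [] => ([], [])
  | l :: rest =>
    if PySem.Chars.strip l = "gui:".toList then
      let (e, r) := pvConsume rest
      (l :: e, r)
    else if pvTopLevel l then ([], l :: rest)
    else pvConsume rest

theorem pvConsume_len_le (ls : List (List Char)) : (pvConsume ls).2.length ≤ ls.length := by
  induction ls with
  | nil => simp [pvConsume]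
  | cons l rest ih =>
    simp only [pvConsume]
    split_ifs <;> simp <;> omega

-- B's outer while-loop
def pvGoB : List (List Char) → Bool → List Char
  | [], _ => []
  | l :: rest, gui =>
    let stripped := PySem.Chars.strip l
    if stripped = "gui:".toList then l ++ pvGoB rest true
    else if gui && (PySem.Chars.startswith stripped "theme:".toList ||
                    PySem.Chars.startswith stripped "authorColors:".toList) then
      let p := pvConsume rest
      p.1.flatten ++ pvGoB p.2 true
    else if gui && pvTopLevel l && !(PySem.Chars.startswith stripped "#".toList) then
      l ++ pvGoB rest false
    else l ++ pvGoB rest gui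
  termination_by lines _ => lines.length
  decreasing_by
    · simp
    · simp only [List.length_cons]
      exact Nat.lt_succ_of_le (pvConsume_len_le rest)
    · simp
    · simp

def remove_gui_sections_py_alt (config : String) : String :=
  String.ofList (pvGoB (pvSplitKeep config.toList) false)

-- ===== PRECONDITION & SPEC =====
def Spec_remove_gui_sections_py (config : String) (out : String) : Prop := out = remove_gui_sections_py_alt config
instance (config : String) (out : String) : Decidable (Spec_remove_gui_sections_py config out) := by unfold Spec_remove_gui_sections_py; infer_instance

-- ===== CLAIM (what is proved, stated in full; the proofs are below) =====
def Claim_equal_remove_gui_sections_py : Prop := ∀ (config : String), Dom_remove_gui_sections_py config → Spec_remove_gui_sections_py config (remove_gui_sections_py config)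

-- ===== LEMMAS AND PROOFS =====

-- Main invariant: A's fold from a skip_lines=False state computes res ++ pvGoB lines gui,
-- and from (skip_lines=True, in_gui=True) it computes res ++ block ++ pvGoB (after block) true.
theorem pv_main (lines : List (List Char)) :
    (∀ (res : List Char) (gui : Bool),
        (lines.foldl pvStepA (res, false, gui)).1 = res ++ pvGoB lines gui) ∧
    (∀ (res : List Char),
        (lines.foldl pvStepA (res, true, true)).1 =
          res ++ (pvConsume lines).1.flatten ++ pvGoB (pvConsume lines).2 true) := by
  induction lines with
  | nil => constructor <;> intros <;> simp [pvGoB, pvConsume]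
  | cons l rest ih =>
    obtain ⟨ih1, ih2⟩ := ih
    by_cases hg : PySem.Chars.strip l = ['g', 'u', 'i', ':']
    · -- a "gui:" line: emitted, in_gui := true, skip untouched
      constructor
      · intro res gui
        simp [pvStepA, hg, pvGoB, ih1]
      · intro res
        simp [pvStepA, hg, pvGoB, pvConsume, ih2]
    · by_cases hth : (PySem.Chars.startswith (PySem.Chars.strip l) ['t','h','e','m','e',':'] = true ∨
                      PySem.Chars.startswith (PySem.Chars.strip l) ['a','u','t','h','o','r','C','o','l','o','r','s',':'] = true)
      · -- a theme:/authorColors: header (only relevant when in_gui)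
        constructor
        · intro res gui
          cases gui with
          | false => simp [pvStepA, hg, hth, pvGoB, ih1]
          | true => simp [pvStepA, hg, hth, pvGoB, ih2]
        · intro res
          by_cases htop : pvTopLevel l = true <;>
            simp [pvStepA, hg, hth, pvGoB, pvConsume, htop, ih2]
      · by_cases htop : pvTopLevel l = true
        · by_cases hcm : PySem.Chars.startswith (PySem.Chars.strip l) ['#'] = true
          · -- top-level comment: emitted, in_gui kept, skip reset
            constructor
            · intro res gui
              cases gui <;> simp [pvStepA, hg, hth, htop, hcm, pvGoB, ih1]
            · intro res
              simp [pvStepA, hg, hth, htop, hcm, pvGoB, pvConsume, ih1]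
          · -- top-level non-comment: emitted, in_gui cleared
            constructor
            · intro res gui
              cases gui <;> simp [pvStepA, hg, hth, htop, hcm, pvGoB, ih1]
            · intro res
              simp [pvStepA, hg, hth, htop, hcm, pvGoB, pvConsume, ih1]
        · -- indented line: emitted iff not skipping
          constructor
          · intro res gui
            cases gui <;> simp [pvStepA, hg, hth, htop, pvGoB, ih1]
          · intro res
            simp [pvStepA, hg, hth, htop, pvConsume, ih2]

-- ===== VERDICT (by name: the statement is the Claim_ definition above) =====
theorem remove_gui_sections_py_spec : Claim_equal_remove_gui_sections_py := by
  intro config _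
  unfold Spec_remove_gui_sections_py remove_gui_sections_py remove_gui_sections_py_alt
  rw [(pv_main (pvSplitKeep config.toList)).1 [] false]
  simp
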